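-- pv_equiv track=rewrite | github.com/compatibl/hackathon2024 | cl/hackathon/bulk_annotate_utils.py | _editops_from_strings
-- ===== SOURCE A (Python) =====
-- def _editops_from_strings(source, dest):
--     m, n = len(source), len(dest)
--     dp = [[0] * (n + 1) for _ in range(m + 1)]
--
--     for i in range(m + 1):
--         for j in range(n + 1):
--             if i == 0:
--                 dp[i][j] = j  # Insertions
--             elif j == 0:
--                 dp[i][j] = i  # Deletions
--             elif source[i - 1] == dest[j - 1]:
--                 dp[i][j] = dp[i - 1][j - 1]  # No change
--             else:
--                 dp[i][j] = 1 + min(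
--                     dp[i - 1][j],    # Deletion
--                     dp[i][j - 1],    # Insertion
--                     dp[i - 1][j - 1] # Replacement
--                 )
--
--     # Reconstruct the edit operations
--     operations = []
--     i, j = m, n
--     while i > 0 or j > 0:
--         if i > 0 and j > 0 and source[i - 1] == dest[j - 1]:
--             i -= 1
--             j -= 1
--         elif j > 0 and (i == 0 or dp[i][j] == dp[i][j - 1] + 1):
--             operations.append(('insert', i, j - 1))
--             j -= 1
--         elif i > 0 and (j == 0 or dp[i][j] == dp[i - 1][j] + 1):
--             operations.append(('delete', i - 1, j))
--             i -= 1
--         else: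
--             operations.append(('replace', i - 1, j - 1))
--             i -= 1
--             j -= 1
--
--     # Reverse to get the correct order
--     operations.reverse()
--     return operations
-- ===== SOURCE B (Python) =====
-- def _editops_from_strings(source, dest):
--     m, n = len(source), len(dest)
--     cost = [[0] * (n + 1) for _ in range(m + 1)]
--     move = [[''] * (n + 1) for _ in range(m + 1)]
--
--     # Forward fill: record, in a parallel grid, the move that produced each cell
--     # (same tie-break priority as the classic backtrack: match, insert, delete, replace).
--     for i in range(m + 1):
--         for j in range(n + 1):
--             if i == 0:
--                 cost[i][j], move[i][j] = j, 'insert'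
--             elif j == 0:
--                 cost[i][j], move[i][j] = i, 'delete'
--             elif source[i - 1] == dest[j - 1]:
--                 cost[i][j], move[i][j] = cost[i - 1][j - 1], 'match'
--             else:
--                 dl, ins, rp = cost[i - 1][j], cost[i][j - 1], cost[i - 1][j - 1]
--                 if ins <= dl and ins <= rp:
--                     cost[i][j], move[i][j] = 1 + ins, 'insert'
--                 elif dl <= rp:
--                     cost[i][j], move[i][j] = 1 + dl, 'delete'
--                 else:
--                     cost[i][j], move[i][j] = 1 + rp, 'replace'
--
--     # Reconstruct by following the stored arrows; no dp-value comparisons needed.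
--     operations = []
--     i, j = m, n
--     while i > 0 or j > 0:
--         mv = move[i][j]
--         if mv == 'match':
--             i, j = i - 1, j - 1
--         elif mv == 'insert':
--             operations.append(('insert', i, j - 1))
--             j -= 1
--         elif mv == 'delete':
--             operations.append(('delete', i - 1, j))
--             i -= 1
--         else:
--             operations.append(('replace', i - 1, j - 1))
--             i, j = i - 1, j - 1
--
--     operations.reverse()
--     return operations
-- ===== Notes on version B (the rewrite author's own statement) =====
-- stated objective: alternative
-- what changed: B records a backpointer grid (match/insert/delete/replace, with A's tie-break priority) during the forward DP fill and reconstructs the operation list by following the stored arrows, instead of re-deriving each move from dp-value comparisons during backtracking.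
import Mathlib
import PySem

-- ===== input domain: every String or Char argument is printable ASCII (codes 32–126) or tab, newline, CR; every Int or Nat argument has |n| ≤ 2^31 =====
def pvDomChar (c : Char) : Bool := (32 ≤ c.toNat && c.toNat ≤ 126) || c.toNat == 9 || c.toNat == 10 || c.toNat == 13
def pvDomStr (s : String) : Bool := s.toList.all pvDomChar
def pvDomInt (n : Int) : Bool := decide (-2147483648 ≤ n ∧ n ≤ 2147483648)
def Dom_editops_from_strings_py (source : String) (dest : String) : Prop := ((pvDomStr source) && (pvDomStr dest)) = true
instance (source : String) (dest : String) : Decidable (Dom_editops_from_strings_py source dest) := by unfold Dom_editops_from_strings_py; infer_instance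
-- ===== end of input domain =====

-- B replaces the dp-value-comparison backtracking with a backpointer grid recorded
-- during the forward fill and a direct arrow walk (objective: alternative).


-- ===== PORT A =====
-- dp[i][j]; the Python loop reads only the previous row and the already-filled
-- prefix of the current row, so the state is the rows built so far (all indices in range).
def aCell (s d : List Char) (prev row : List Int) (i j : Nat) : Int :=
  if i = 0 then (j : Int)
  else if j = 0 then (i : Int)
  else if s.getD (i-1) ' ' == d.getD (j-1) ' ' then prev.getD (j-1) 0
  else 1 + min (prev.getD j 0) (min (row.getD (j-1) 0) (prev.getD (j-1) 0))

def aRow (s d : List Char) (prev : List Int) (i : Nat) : List Int :=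
  (List.range (d.length + 1)).foldl (fun row j => row ++ [aCell s d prev row i j]) []

def aTable (s d : List Char) : List (List Int) :=
  (List.range (s.length + 1)).foldl (fun tab i => tab ++ [aRow s d (tab.getD (i-1) []) i]) []

-- the while loop, recursion on i+j (every branch decreases it)
def aBack (s d : List Char) (dp : List (List Int)) (i j : Nat)
    (acc : List (String × Int × Int)) : List (String × Int × Int) :=
  if _h0 : i = 0 ∧ j = 0 then acc
  else if h1 : 0 < i ∧ 0 < j ∧ s.getD (i-1) ' ' == d.getD (j-1) ' ' then
    aBack s d dp (i-1) (j-1) acc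
  else if _h2 : 0 < j ∧ (i = 0 ∨ (dp.getD i []).getD j 0 = (dp.getD i []).getD (j-1) 0 + 1) then
    aBack s d dp i (j-1) (acc ++ [("insert", (i:Int), (j:Int)-1)])
  else if _h3 : 0 < i ∧ (j = 0 ∨ (dp.getD i []).getD j 0 = (dp.getD (i-1) []).getD j 0 + 1) then
    aBack s d dp (i-1) j (acc ++ [("delete", (i:Int)-1, (j:Int))])
  else
    aBack s d dp (i-1) (j-1) (acc ++ [("replace", (i:Int)-1, (j:Int)-1)])
  termination_by i + j
  decreasing_by all_goals omega

def editops_from_strings_py (source : String) (dest : String) : List (String × Int × Int) :=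
  let s := source.toList
  let d := dest.toList
  (aBack s d (aTable s d) s.length d.length []).reverse

-- ===== PORT B =====
def bCell (s d : List Char) (prev row : List (Int × String)) (i j : Nat) : Int × String :=
  if i = 0 then ((j : Int), "insert")
  else if j = 0 then ((i : Int), "delete")
  else if s.getD (i-1) ' ' == d.getD (j-1) ' ' then ((prev.getD (j-1) (0, "")).1, "match")
  else
    let dl := (prev.getD j (0, "")).1
    let ins := (row.getD (j-1) (0, "")).1
    let rp := (prev.getD (j-1) (0, "")).1
    if ins ≤ dl ∧ ins ≤ rp then (1 + ins, "insert")
    else if dl ≤ rp then (1 + dl, "delete")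
    else (1 + rp, "replace")

def bRow (s d : List Char) (prev : List (Int × String)) (i : Nat) : List (Int × String) :=
  (List.range (d.length + 1)).foldl (fun row j => row ++ [bCell s d prev row i j]) []

def bTable (s d : List Char) : List (List (Int × String)) :=
  (List.range (s.length + 1)).foldl (fun tab i => tab ++ [bRow s d (tab.getD (i-1) []) i]) []

-- arrow walk; fuel only makes the recursion total (i+j suffices on the real table)
def bFollow (tab : List (List (Int × String))) :
    Nat → Nat → Nat → List (String × Int × Int) → List (String × Int × Int)
  | 0, _, _, acc => acc
  | _+1, 0, 0, acc => acc
  | fuel+1, i, j, acc =>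
    let mv := ((tab.getD i []).getD j (0, "")).2
    if mv == "match" then bFollow tab fuel (i-1) (j-1) acc
    else if mv == "insert" then bFollow tab fuel i (j-1) (acc ++ [("insert", (i:Int), (j:Int)-1)])
    else if mv == "delete" then bFollow tab fuel (i-1) j (acc ++ [("delete", (i:Int)-1, (j:Int))])
    else bFollow tab fuel (i-1) (j-1) (acc ++ [("replace", (i:Int)-1, (j:Int)-1)])

def editops_from_strings_py_alt (source : String) (dest : String) : List (String × Int × Int) :=
  let s := source.toList
  let d := dest.toList
  (bFollow (bTable s d) (s.length + d.length) s.length d.length []).reverse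

-- ===== PRECONDITION & SPEC =====
def Spec_editops_from_strings_py (source : String) (dest : String) (out : List (String × Int × Int)) : Prop := out = editops_from_strings_py_alt source dest
instance (source : String) (dest : String) (out : List (String × Int × Int)) : Decidable (Spec_editops_from_strings_py source dest out) := by unfold Spec_editops_from_strings_py; infer_instance

-- ===== CLAIM (what is proved, stated in full; the proofs are below) =====
def Claim_equal_editops_from_strings_py : Prop := ∀ (source : String) (dest : String), Dom_editops_from_strings_py source dest → Spec_editops_from_strings_py source dest (editops_from_strings_py source dest)

-- ===== LEMMAS AND PROOFS =====

-- mathematical edit distance, the common characterisation of both tables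
def Dv (s d : List Char) : Nat → Nat → Int
  | 0, j => (j : Int)
  | i+1, 0 => ((i : Int) + 1)
  | i+1, j+1 =>
    if s.getD i ' ' == d.getD j ' ' then Dv s d i j
    else 1 + min (Dv s d i (j+1)) (min (Dv s d (i+1) j) (Dv s d i j))
  termination_by i j => (i, j)

-- the move B records, as a function of Dv
def Mv (s d : List Char) : Nat → Nat → String
  | 0, _ => "insert"
  | _+1, 0 => "delete"
  | i+1, j+1 =>
    if s.getD i ' ' == d.getD j ' ' then "match"
    else if Dv s d (i+1) j ≤ Dv s d i (j+1) ∧ Dv s d (i+1) j ≤ Dv s d i j then "insert"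
    else if Dv s d i (j+1) ≤ Dv s d i j then "delete"
    else "replace"

theorem getD_range_map {α : Type} (f : Nat → α) (L j : Nat) (x : α) (h : j < L) :
    ((List.range L).map f).getD j x = f j := by
  simp [List.getD, h]

theorem aCell_eq (s d : List Char) (i : Nat) (prev : List Int)
    (hprev : i = 0 ∨ prev = (List.range (d.length + 1)).map (Dv s d (i-1)))
    (k : Nat) (hk : k ≤ d.length) :
    aCell s d prev ((List.range k).map (Dv s d i)) i k = Dv s d i k := by
  unfold aCell
  cases i with
  | zero => simp [Dv]
  | succ i' =>
    have hprev' : prev = (List.range (d.length + 1)).map (Dv s d i') := by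
      rcases hprev with h | h
      · omega
      · simpa using h
    cases k with
    | zero => simp [Dv]
    | succ j' =>
      simp only [Nat.succ_ne_zero, if_false, Nat.add_sub_cancel, hprev']
      rw [getD_range_map _ _ _ _ (by omega), getD_range_map _ _ _ _ (by omega),
          getD_range_map _ _ _ _ (by omega)]
      by_cases hc : (s.getD i' ' ' == d.getD j' ' ') = true
      · rw [if_pos hc, Dv, if_pos hc]
      · rw [if_neg hc, Dv, if_neg hc]

theorem aRow_eq (s d : List Char) (i : Nat) (prev : List Int)
    (hprev : i = 0 ∨ prev = (List.range (d.length + 1)).map (Dv s d (i-1))) :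
    aRow s d prev i = (List.range (d.length + 1)).map (Dv s d i) := by
  unfold aRow
  suffices h : ∀ k, k ≤ d.length + 1 →
      (List.range k).foldl (fun row j => row ++ [aCell s d prev row i j]) []
        = (List.range k).map (Dv s d i) by
    exact h (d.length + 1) le_rfl
  intro k hk
  induction k with
  | zero => simp
  | succ k ih =>
    rw [List.range_succ, List.foldl_append, List.map_append, ih (by omega)]
    simp only [List.foldl_cons, List.foldl_nil, List.map_cons, List.map_nil]
    rw [aCell_eq s d i prev hprev k (by omega)]

theorem aTable_eq (s d : List Char) :
    aTable s d = (List.range (s.length + 1)).map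
      (fun i => (List.range (d.length + 1)).map (Dv s d i)) := by
  unfold aTable
  suffices h : ∀ k, k ≤ s.length + 1 →
      (List.range k).foldl (fun tab i => tab ++ [aRow s d (tab.getD (i-1) []) i]) []
        = (List.range k).map (fun i => (List.range (d.length + 1)).map (Dv s d i)) by
    exact h (s.length + 1) le_rfl
  intro k hk
  induction k with
  | zero => simp
  | succ k ih =>
    rw [List.range_succ, List.foldl_append, List.map_append, ih (by omega)]
    simp only [List.foldl_cons, List.foldl_nil, List.map_cons, List.map_nil]
    have harg : aRow s d (((List.range k).map (fun i => (List.range (d.length+1)).map (Dv s d i))).getD (k-1) []) k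
        = (List.range (d.length+1)).map (Dv s d k) := by
      cases k with
      | zero => exact aRow_eq s d 0 _ (Or.inl rfl)
      | succ k' =>
        have e : ((List.range (k'+1)).map (fun i => (List.range (d.length+1)).map (Dv s d i))).getD k' []
            = (List.range (d.length+1)).map (Dv s d k') := getD_range_map _ _ _ _ (by omega)
        simp only [Nat.add_sub_cancel, e]
        exact aRow_eq s d (k'+1) _ (Or.inr (by simp))
    rw [harg]

theorem bCell_eq (s d : List Char) (i : Nat) (prev : List (Int × String))
    (hprev : i = 0 ∨ prev = (List.range (d.length + 1)).map (fun j => (Dv s d (i-1) j, Mv s d (i-1) j)))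
    (k : Nat) (hk : k ≤ d.length) :
    bCell s d prev ((List.range k).map (fun j => (Dv s d i j, Mv s d i j))) i k
      = (Dv s d i k, Mv s d i k) := by
  unfold bCell
  cases i with
  | zero => simp [Dv, Mv]
  | succ i' =>
    have hprev' : prev = (List.range (d.length + 1)).map (fun j => (Dv s d i' j, Mv s d i' j)) := by
      rcases hprev with h | h
      · omega
      · simpa using h
    cases k with
    | zero => simp [Dv, Mv]
    | succ j' =>
      simp only [Nat.succ_ne_zero, if_false, Nat.add_sub_cancel, hprev']
      rw [getD_range_map _ _ _ _ (by omega), getD_range_map _ _ _ _ (by omega),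
          getD_range_map _ _ _ _ (by omega)]
      by_cases hc : (s.getD i' ' ' == d.getD j' ' ') = true
      · rw [if_pos hc]
        rw [Dv, if_pos hc]
        rw [Mv, if_pos hc]
      · rw [if_neg hc]
        simp only []
        rw [Dv, if_neg hc]
        rw [Mv, if_neg hc]
        by_cases h1 : Dv s d (i'+1) j' ≤ Dv s d i' (j'+1) ∧ Dv s d (i'+1) j' ≤ Dv s d i' j'
        · rw [if_pos h1, if_pos h1]
          exact Prod.ext (by omega) rfl
        · rw [if_neg h1, if_neg h1]
          by_cases h2 : Dv s d i' (j'+1) ≤ Dv s d i' j'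
          · rw [if_pos h2, if_pos h2]
            exact Prod.ext (by omega) rfl
          · rw [if_neg h2, if_neg h2]
            exact Prod.ext (by omega) rfl

theorem bRow_eq (s d : List Char) (i : Nat) (prev : List (Int × String))
    (hprev : i = 0 ∨ prev = (List.range (d.length + 1)).map (fun j => (Dv s d (i-1) j, Mv s d (i-1) j))) :
    bRow s d prev i = (List.range (d.length + 1)).map (fun j => (Dv s d i j, Mv s d i j)) := by
  unfold bRow
  suffices h : ∀ k, k ≤ d.length + 1 →
      (List.range k).foldl (fun row j => row ++ [bCell s d prev row i j]) []
        = (List.range k).map (fun j => (Dv s d i j, Mv s d i j)) by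
    exact h (d.length + 1) le_rfl
  intro k hk
  induction k with
  | zero => simp
  | succ k ih =>
    rw [List.range_succ, List.foldl_append, List.map_append, ih (by omega)]
    simp only [List.foldl_cons, List.foldl_nil, List.map_cons, List.map_nil]
    rw [bCell_eq s d i prev hprev k (by omega)]

theorem bTable_eq (s d : List Char) :
    bTable s d = (List.range (s.length + 1)).map
      (fun i => (List.range (d.length + 1)).map (fun j => (Dv s d i j, Mv s d i j))) := by
  unfold bTable
  suffices h : ∀ k, k ≤ s.length + 1 →
      (List.range k).foldl (fun tab i => tab ++ [bRow s d (tab.getD (i-1) []) i]) []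
        = (List.range k).map (fun i => (List.range (d.length + 1)).map (fun j => (Dv s d i j, Mv s d i j))) by
    exact h (s.length + 1) le_rfl
  intro k hk
  induction k with
  | zero => simp
  | succ k ih =>
    rw [List.range_succ, List.foldl_append, List.map_append, ih (by omega)]
    simp only [List.foldl_cons, List.foldl_nil, List.map_cons, List.map_nil]
    have harg : bRow s d (((List.range k).map (fun i => (List.range (d.length+1)).map (fun j => (Dv s d i j, Mv s d i j)))).getD (k-1) []) k
        = (List.range (d.length+1)).map (fun j => (Dv s d k j, Mv s d k j)) := by
      cases k with
      | zero => exact bRow_eq s d 0 _ (Or.inl rfl)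
      | succ k' =>
        have e : ((List.range (k'+1)).map (fun i => (List.range (d.length+1)).map (fun j => (Dv s d i j, Mv s d i j)))).getD k' []
            = (List.range (d.length+1)).map (fun j => (Dv s d k' j, Mv s d k' j)) := getD_range_map _ _ _ _ (by omega)
        simp only [Nat.add_sub_cancel, e]
        exact bRow_eq s d (k'+1) _ (Or.inr (by simp))
    rw [harg]

theorem aTable_getD (s d : List Char) (i j : Nat) (hi : i ≤ s.length) (hj : j ≤ d.length) :
    ((aTable s d).getD i []).getD j 0 = Dv s d i j := by
  rw [aTable_eq, getD_range_map _ _ _ _ (by omega), getD_range_map _ _ _ _ (by omega)]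

theorem bTable_mv (s d : List Char) (i j : Nat) (hi : i ≤ s.length) (hj : j ≤ d.length) :
    (((bTable s d).getD i []).getD j (0, "")).2 = Mv s d i j := by
  rw [bTable_eq, getD_range_map _ _ _ _ (by omega), getD_range_map _ _ _ _ (by omega)]

theorem back_eq (s d : List Char) (fuel : Nat) : ∀ (i j : Nat) (acc : List (String × Int × Int)),
    i + j ≤ fuel → i ≤ s.length → j ≤ d.length →
    aBack s d (aTable s d) i j acc = bFollow (bTable s d) fuel i j acc := by
  induction fuel with
  | zero =>
    intro i j acc hf hi hj
    have hij : i = 0 ∧ j = 0 := by omega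
    obtain ⟨rfl, rfl⟩ := hij
    rw [aBack, dif_pos ⟨rfl, rfl⟩]
    rfl
  | succ fuel ih =>
    intro i j acc hf hi hj
    match i, j with
    | 0, 0 => rw [aBack, dif_pos ⟨rfl, rfl⟩]; rfl
    | 0, j'+1 =>
      rw [aBack, dif_neg (by omega), dif_neg (by omega), dif_pos ⟨Nat.succ_pos _, Or.inl rfl⟩]
      have hmv : (((bTable s d).getD 0 []).getD (j'+1) (0, "")).2 = "insert" := by
        rw [bTable_mv s d 0 (j'+1) (by omega) hj, Mv]
      simp only [bFollow, hmv]
      rw [if_neg (by decide), if_pos (by decide)]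
      exact ih 0 j' _ (by omega) hi (by omega)
    | i'+1, 0 =>
      rw [aBack, dif_neg (by omega), dif_neg (by omega), dif_neg (by omega),
          dif_pos ⟨Nat.succ_pos _, Or.inl rfl⟩]
      have hmv : (((bTable s d).getD (i'+1) []).getD 0 (0, "")).2 = "delete" := by
        rw [bTable_mv s d (i'+1) 0 hi (by omega), Mv]
      simp only [bFollow, hmv]
      rw [if_neg (by decide), if_neg (by decide), if_pos (by decide)]
      exact ih i' 0 _ (by omega) (by omega) hj
    | i'+1, j'+1 =>
      have hDij : ((aTable s d).getD (i'+1) []).getD (j'+1) 0 = Dv s d (i'+1) (j'+1) :=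
        aTable_getD s d (i'+1) (j'+1) hi hj
      have hDins : ((aTable s d).getD (i'+1) []).getD (j'+1-1) 0 = Dv s d (i'+1) j' :=
        aTable_getD s d (i'+1) j' hi (by omega)
      have hDdel : ((aTable s d).getD (i'+1-1) []).getD (j'+1) 0 = Dv s d i' (j'+1) :=
        aTable_getD s d i' (j'+1) (by omega) hj
      have hmv : (((bTable s d).getD (i'+1) []).getD (j'+1) (0, "")).2 = Mv s d (i'+1) (j'+1) :=
        bTable_mv s d (i'+1) (j'+1) hi hj
      by_cases hc : (s.getD i' ' ' == d.getD j' ' ') = true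
      · rw [aBack, dif_neg (by omega), dif_pos ⟨Nat.succ_pos _, Nat.succ_pos _, hc⟩]
        have hmv' : (((bTable s d).getD (i'+1) []).getD (j'+1) (0, "")).2 = "match" := by
          rw [hmv, Mv, if_pos hc]
        simp only [bFollow, hmv']
        rw [if_pos (by decide)]
        exact ih i' j' _ (by omega) (by omega) (by omega)
      · have hval : Dv s d (i'+1) (j'+1)
            = 1 + min (Dv s d i' (j'+1)) (min (Dv s d (i'+1) j') (Dv s d i' j')) := by
          rw [Dv, if_neg hc]
        by_cases hins : Dv s d (i'+1) j' ≤ Dv s d i' (j'+1) ∧ Dv s d (i'+1) j' ≤ Dv s d i' j'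
        · rw [aBack, dif_neg (by omega), dif_neg (fun h => hc h.2.2),
              dif_pos ⟨Nat.succ_pos _, Or.inr (by rw [hDij, hDins, hval]; omega)⟩]
          have hmv' : (((bTable s d).getD (i'+1) []).getD (j'+1) (0, "")).2 = "insert" := by
            rw [hmv, Mv, if_neg hc, if_pos hins]
          simp only [bFollow, hmv']
          rw [if_neg (by decide), if_pos (by decide)]
          exact ih (i'+1) j' _ (by omega) hi (by omega)
        · have hne2 : ¬ (0 < j'+1 ∧ (i'+1 = 0 ∨
              ((aTable s d).getD (i'+1) []).getD (j'+1) 0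
                = ((aTable s d).getD (i'+1) []).getD (j'+1-1) 0 + 1)) := by
            rintro ⟨-, h | h⟩
            · omega
            · rw [hDij, hDins, hval] at h; omega
          by_cases hdel : Dv s d i' (j'+1) ≤ Dv s d i' j'
          · rw [aBack, dif_neg (by omega), dif_neg (fun h => hc h.2.2), dif_neg hne2,
                dif_pos ⟨Nat.succ_pos _, Or.inr (by rw [hDij, hDdel, hval]; omega)⟩]
            have hmv' : (((bTable s d).getD (i'+1) []).getD (j'+1) (0, "")).2 = "delete" := by
              rw [hmv, Mv, if_neg hc, if_neg hins, if_pos hdel]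
            simp only [bFollow, hmv']
            rw [if_neg (by decide), if_neg (by decide), if_pos (by decide)]
            exact ih i' (j'+1) _ (by omega) (by omega) hj
          · have hne3 : ¬ (0 < i'+1 ∧ (j'+1 = 0 ∨
                ((aTable s d).getD (i'+1) []).getD (j'+1) 0
                  = ((aTable s d).getD (i'+1-1) []).getD (j'+1) 0 + 1)) := by
              rintro ⟨-, h | h⟩
              · omega
              · rw [hDij, hDdel, hval] at h; omega
            rw [aBack, dif_neg (by omega), dif_neg (fun h => hc h.2.2), dif_neg hne2, dif_neg hne3]
            have hmv' : (((bTable s d).getD (i'+1) []).getD (j'+1) (0, "")).2 = "replace" := by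
              rw [hmv, Mv, if_neg hc, if_neg hins, if_neg hdel]
            simp only [bFollow, hmv']
            rw [if_neg (by decide), if_neg (by decide), if_neg (by decide)]
            exact ih i' j' _ (by omega) (by omega) (by omega)

-- ===== VERDICT (by name: the statement is the Claim_ definition above) =====
theorem editops_from_strings_py_spec : Claim_equal_editops_from_strings_py := by
  intro source dest _
  unfold Spec_editops_from_strings_py editops_from_strings_py editops_from_strings_py_alt
  simp only []
  rw [back_eq source.toList dest.toList (source.toList.length + dest.toList.length)
      source.toList.length dest.toList.length [] (le_refl _) (le_refl _) (le_refl _)]
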